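-- pv_equiv track=rewrite | github.com/ariuk44/retake_exam_prep | day_0.py | isIsolated
-- ===== SOURCE A (Python) =====
-- def isIsolated(n: int) -> int:
--     if n < 1 or n > 2097151:
--         return -1
--
--     square = n * n
--     cube = n * n * n
--
--     while square > 0:
--         digit_sq = square % 10
--         square //= 10
--
--         temp = cube
--         while temp > 0:
--             digit_cb = temp % 10
--             temp //= 10
--             if digit_sq == digit_cb:
--                 return 0
--     return 1
-- ===== SOURCE B (Python) =====
-- def isIsolated(n: int) -> int:
--     if n < 1 or n > 2097151:
--         return -1
--
--     def digits(m):
--         s = set()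
--         while m > 0:
--             s.add(m % 10)
--             m //= 10
--         return s
--
--     return 0 if digits(n * n) & digits(n * n * n) else 1
-- ===== Notes on version B (the rewrite author's own statement) =====
-- stated objective: idiomatic
-- what changed: Replaces the nested digit-by-digit double scan (restarting the cube scan for every square digit) by building each number's digit set once and testing the two sets' intersection.
import Mathlib
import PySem

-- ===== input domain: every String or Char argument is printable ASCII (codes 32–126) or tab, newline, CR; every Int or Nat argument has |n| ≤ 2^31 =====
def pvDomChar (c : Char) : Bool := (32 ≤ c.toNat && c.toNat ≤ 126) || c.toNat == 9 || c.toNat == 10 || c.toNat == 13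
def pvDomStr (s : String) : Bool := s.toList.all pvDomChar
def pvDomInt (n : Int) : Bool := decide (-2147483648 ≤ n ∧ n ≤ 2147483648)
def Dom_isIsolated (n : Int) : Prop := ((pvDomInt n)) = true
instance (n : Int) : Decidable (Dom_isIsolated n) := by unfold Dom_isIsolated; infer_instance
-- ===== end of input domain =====

-- B builds each number's digit set once and intersects them, replacing A's nested digit scans; objective: idiomatic.

-- termination helper shared by the loops (floor division by 10 shrinks a positive int)
theorem pvDiv10_toNat_lt (m : Int) (h : 0 < m) :
    (PySem.Int.floordiv m 10).toNat < m.toNat := by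
  rw [PySem.Int.floordiv_eq_ediv_of_pos (by norm_num)]
  omega

-- ===== PORT A =====
-- inner 'while temp > 0' loop: true iff it would 'return 0'
def isIsolatedInner (digit_sq : Int) (temp : Int) : Bool :=
  if h : 0 < temp then
    let digit_cb := PySem.Int.mod temp 10
    let temp' := PySem.Int.floordiv temp 10
    if digit_sq = digit_cb then true else isIsolatedInner digit_sq temp'
  else false
termination_by temp.toNat
decreasing_by exact pvDiv10_toNat_lt temp h

-- outer 'while square > 0' loop
def isIsolatedOuter (square : Int) (cube : Int) : Int :=
  if h : 0 < square then
    let digit_sq := PySem.Int.mod square 10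
    let square' := PySem.Int.floordiv square 10
    if isIsolatedInner digit_sq cube then 0 else isIsolatedOuter square' cube
  else 1
termination_by square.toNat
decreasing_by exact pvDiv10_toNat_lt square h

def isIsolated (n : Int) : Int :=
  if n < 1 ∨ n > 2097151 then -1
  else isIsolatedOuter (n * n) (n * n * n)

-- ===== PORT B =====
-- helper digits(m): s = set(); while m > 0: s.add(m % 10); m //= 10; return s
def pvDigitsLoop (m : Int) (s : PySem.Set Int) : PySem.Set Int :=
  if h : 0 < m then
    pvDigitsLoop (PySem.Int.floordiv m 10) (PySem.Set.add s (PySem.Int.mod m 10))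
  else s
termination_by m.toNat
decreasing_by exact pvDiv10_toNat_lt m h

def pvDigits (m : Int) : PySem.Set Int := pvDigitsLoop m PySem.Set.empty

def isIsolated_alt (n : Int) : Int :=
  if n < 1 ∨ n > 2097151 then -1
  else if PySem.Set.inter (pvDigits (n * n)) (pvDigits (n * n * n)) ≠ [] then 0 else 1

-- ===== PRECONDITION & SPEC =====
def Spec_isIsolated (n : Int) (out : Int) : Prop := out = isIsolated_alt n
instance (n : Int) (out : Int) : Decidable (Spec_isIsolated n out) := by unfold Spec_isIsolated; infer_instance

-- ===== CLAIM (what is proved, stated in full; the proofs are below) =====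
def Claim_equal_isIsolated : Prop := ∀ (n : Int), Dom_isIsolated n → Spec_isIsolated n (isIsolated n)

-- ===== LEMMAS AND PROOFS =====

theorem inner_pos (x m : Int) (h : 0 < m) :
    isIsolatedInner x m =
      (decide (x = PySem.Int.mod m 10) || isIsolatedInner x (PySem.Int.floordiv m 10)) := by
  rw [isIsolatedInner]
  simp only [dif_pos h]
  by_cases hx : x = PySem.Int.mod m 10 <;> simp [hx]

theorem inner_nonpos (x m : Int) (h : ¬ 0 < m) : isIsolatedInner x m = false := by
  rw [isIsolatedInner]; simp [h]

-- membership in the digit set B builds = A's inner scan finding that digit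
theorem mem_pvDigitsLoop (x m : Int) (s : PySem.Set Int) :
    x ∈ pvDigitsLoop m s ↔ x ∈ s ∨ isIsolatedInner x m = true := by
  fun_induction pvDigitsLoop m s with
  | case1 m s h ih =>
    rw [ih, PySem.Set.mem_add, inner_pos x m h]
    simp only [Bool.or_eq_true, decide_eq_true_eq]
    tauto
  | case2 m s h =>
    rw [inner_nonpos x m h]
    simp

theorem outer_zero_or_one (square cube : Int) :
    isIsolatedOuter square cube = 0 ∨ isIsolatedOuter square cube = 1 := by
  fun_induction isIsolatedOuter square cube
  all_goals first
    | (left; rfl)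
    | (right; rfl)
    | assumption

theorem outer_eq_zero_iff (square cube : Int) :
    isIsolatedOuter square cube = 0 ↔
      ∃ x, isIsolatedInner x square = true ∧ isIsolatedInner x cube = true := by
  fun_induction isIsolatedOuter square cube with
  | case1 sq h d hm =>
    -- inner hit on the last digit: returns 0
    simp only [true_iff]
    refine ⟨d, ?_, hm⟩
    rw [inner_pos d sq h]
    simp only [Bool.or_eq_true, decide_eq_true_eq]
    exact Or.inl rfl
  | case2 sq h d sq' hm ih =>
    rw [ih]
    constructor
    · rintro ⟨x, hx1, hx2⟩
      refine ⟨x, ?_, hx2⟩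
      rw [inner_pos x sq h]
      simp only [Bool.or_eq_true, decide_eq_true_eq]
      exact Or.inr hx1
    · rintro ⟨x, hx1, hx2⟩
      rw [inner_pos x sq h] at hx1
      simp only [Bool.or_eq_true, decide_eq_true_eq] at hx1
      rcases hx1 with hxd | hx1
      · rw [hxd] at hx2
        exact absurd hx2 hm
      · exact ⟨x, hx1, hx2⟩
  | case3 sq h =>
    constructor
    · intro h0; norm_num at h0
    · rintro ⟨x, hx1, _⟩
      rw [inner_nonpos x sq h] at hx1
      exact absurd hx1 (by simp)

theorem inter_ne_nil_iff (s t : PySem.Set Int) :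
    PySem.Set.inter s t ≠ [] ↔ ∃ x, x ∈ s ∧ x ∈ t := by
  constructor
  · intro h
    obtain ⟨x, hx⟩ := List.exists_mem_of_ne_nil _ h
    exact ⟨x, (PySem.Set.mem_inter _ _ _).mp hx⟩
  · rintro ⟨x, hxs, hxt⟩ hnil
    have hmem : x ∈ PySem.Set.inter s t := (PySem.Set.mem_inter _ _ _).mpr ⟨hxs, hxt⟩
    rw [hnil] at hmem
    exact absurd hmem (List.not_mem_nil)

-- ===== VERDICT (by name: the statement is the Claim_ definition above) =====
theorem isIsolated_spec : Claim_equal_isIsolated := by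
  intro n _
  unfold Spec_isIsolated isIsolated isIsolated_alt
  split
  · rfl
  · have hiff :
        (PySem.Set.inter (pvDigits (n * n)) (pvDigits (n * n * n)) ≠ []) ↔
        isIsolatedOuter (n * n) (n * n * n) = 0 := by
      rw [inter_ne_nil_iff, outer_eq_zero_iff]
      unfold pvDigits
      constructor
      · rintro ⟨x, hx1, hx2⟩
        rw [mem_pvDigitsLoop] at hx1 hx2
        exact ⟨x, hx1.resolve_left (by simp [PySem.Set.empty]),
               hx2.resolve_left (by simp [PySem.Set.empty])⟩
      · rintro ⟨x, hx1, hx2⟩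
        exact ⟨x, (mem_pvDigitsLoop x _ _).mpr (Or.inr hx1),
               (mem_pvDigitsLoop x _ _).mpr (Or.inr hx2)⟩
    rcases outer_zero_or_one (n * n) (n * n * n) with h0 | h1
    · rw [h0, if_pos (hiff.mpr h0)]
    · rw [h1, if_neg]
      intro hne
      rw [hiff.mp hne] at h1
      norm_num at h1
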